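-- pv_equiv track=rewrite | github.com/NeoTox419/Daily_coding_practice | PTOD/4_3_26_gfg.py | maxSubarrayXOR
-- ===== SOURCE A (Python) =====
-- def maxSubarrayXOR(arr, k):
--     n = len(arr)
--
--     # XOR of first window
--     window_xor = 0
--     for i in range(k):
--         window_xor ^= arr[i]
--
--     max_xor = window_xor
--
--     # Slide the window
--     for i in range(k, n):
--         window_xor ^= arr[i-k]  # remove outgoing element
--         window_xor ^= arr[i]    # add incoming element
--         max_xor = max(max_xor, window_xor)
--
--     return max_xor
-- ===== SOURCE B (Python) =====
-- def maxSubarrayXOR(arr, k):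
--     # Prefix-XOR table: prefix[i] = XOR of arr[:i]; window XOR = prefix[i] ^ prefix[i-k].
--     prefix = [0]
--     for x in arr:
--         prefix.append(prefix[-1] ^ x)
--     max_xor = prefix[k]
--     for i in range(k + 1, len(prefix)):
--         max_xor = max(max_xor, prefix[i] ^ prefix[i - k])
--     return max_xor
-- ===== Notes on version B (the rewrite author's own statement) =====
-- stated objective: alternative
-- what changed: Replaces the incremental sliding-window update with a precomputed prefix-XOR table and a lookup-based pass taking each window XOR as prefix[i]^prefix[i-k].
import Mathlib
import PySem

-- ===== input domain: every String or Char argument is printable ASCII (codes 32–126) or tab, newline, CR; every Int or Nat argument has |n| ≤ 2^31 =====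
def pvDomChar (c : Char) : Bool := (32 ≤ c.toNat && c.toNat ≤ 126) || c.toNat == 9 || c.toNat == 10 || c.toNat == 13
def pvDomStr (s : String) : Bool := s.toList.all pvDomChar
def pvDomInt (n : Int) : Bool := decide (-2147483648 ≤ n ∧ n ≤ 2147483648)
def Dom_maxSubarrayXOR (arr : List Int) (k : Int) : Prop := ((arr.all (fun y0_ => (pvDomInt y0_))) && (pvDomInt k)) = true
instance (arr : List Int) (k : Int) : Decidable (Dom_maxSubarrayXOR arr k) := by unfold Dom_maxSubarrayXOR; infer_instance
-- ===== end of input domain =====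

-- B replaces the incremental sliding-window XOR update with a precomputed prefix-XOR
-- table and a lookup-based pass (alternative decomposition, same asymptotic cost).

-- ===== PORT A =====
def maxSubarrayXOR (arr : List Int) (k : Int) : Int :=
  let n : Int := (arr.length : Int)
  -- XOR of first window
  let windowXor : Int :=
    (PySem.List.pyRange 0 k 1).foldl
      (fun w i => PySem.Int.bxor w (PySem.List.pyGetD arr i 0)) 0
  -- Slide the window, tracking (window_xor, max_xor)
  let st :=
    (PySem.List.pyRange k n 1).foldl
      (fun (st : Int × Int) i =>
        let w := PySem.Int.bxor
          (PySem.Int.bxor st.1 (PySem.List.pyGetD arr (i - k) 0))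
          (PySem.List.pyGetD arr i 0)
        (w, max st.2 w))
      (windowXor, windowXor)
  st.2

-- ===== PORT B =====
def maxSubarrayXOR_alt (arr : List Int) (k : Int) : Int :=
  -- prefix-XOR table: prefix[i] = XOR of arr[:i]
  let pre : List Int :=
    arr.foldl (fun p x => p ++ [PySem.Int.bxor (PySem.List.pyGetD p (-1) 0) x]) [0]
  let m0 : Int := PySem.List.pyGetD pre k 0
  (PySem.List.pyRange (k + 1) (pre.length : Int) 1).foldl
    (fun m i => max m (PySem.Int.bxor (PySem.List.pyGetD pre i 0)
                                      (PySem.List.pyGetD pre (i - k) 0))) m0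

-- ===== PRECONDITION & SPEC =====
-- A raises IndexError whenever k < 0 or k > len(arr); Pre_ admits exactly the inputs
-- on which A returns normally.
def Pre_maxSubarrayXOR (arr : List Int) (k : Int) : Prop :=
  0 ≤ k ∧ k ≤ (arr.length : Int)
instance (arr : List Int) (k : Int) : Decidable (Pre_maxSubarrayXOR arr k) := by
  unfold Pre_maxSubarrayXOR; infer_instance

def pvWitness_maxSubarrayXOR : List Int × Int := ([1, 2, 3, 4], 2)

def Spec_maxSubarrayXOR (arr : List Int) (k : Int) (out : Int) : Prop := out = maxSubarrayXOR_alt arr k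
instance (arr : List Int) (k : Int) (out : Int) : Decidable (Spec_maxSubarrayXOR arr k out) := by unfold Spec_maxSubarrayXOR; infer_instance

-- ===== CLAIM (what is proved, stated in full; the proofs are below) =====
def Claim_equal_maxSubarrayXOR : Prop := ∀ (arr : List Int) (k : Int), Dom_maxSubarrayXOR arr k → Pre_maxSubarrayXOR arr k → Spec_maxSubarrayXOR arr k (maxSubarrayXOR arr k)

-- ===== LEMMAS AND PROOFS =====

-- XOR algebra: PySem.Int.bxor is associative (shown via the (sign-bit, magnitude) encoding).
def pvEnc : Bool × Nat → Int
  | (false, n) => (n : Int)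
  | (true, n) => -(n : Int) - 1

def pvDec (a : Int) : Bool × Nat :=
  if 0 ≤ a then (false, a.toNat) else (true, (-a - 1).toNat)

def pvXorP (p q : Bool × Nat) : Bool × Nat := (xor p.1 q.1, p.2 ^^^ q.2)

theorem pvDec_pvEnc (p : Bool × Nat) : pvDec (pvEnc p) = p := by
  obtain ⟨b, n⟩ := p
  cases b <;> simp [pvEnc, pvDec] <;> omega

theorem bxor_eq_pvEnc (a b : Int) :
    PySem.Int.bxor a b = pvEnc (pvXorP (pvDec a) (pvDec b)) := by
  unfold PySem.Int.bxor pvDec pvXorP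
  split_ifs with h1 h2 h2 <;> simp [pvEnc]

theorem pvXorP_assoc (p q r : Bool × Nat) :
    pvXorP (pvXorP p q) r = pvXorP p (pvXorP q r) := by
  simp [pvXorP, Nat.xor_assoc]

theorem bxor_assoc (a b c : Int) :
    PySem.Int.bxor (PySem.Int.bxor a b) c = PySem.Int.bxor a (PySem.Int.bxor b c) := by
  simp only [bxor_eq_pvEnc, pvDec_pvEnc, pvXorP_assoc]

-- ((a⊕b)⊕c)⊕d = (a⊕d)⊕(b⊕c): the sliding-window update step
theorem bxor_four (a b c d : Int) :
    PySem.Int.bxor (PySem.Int.bxor (PySem.Int.bxor a b) c) d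
      = PySem.Int.bxor (PySem.Int.bxor a d) (PySem.Int.bxor b c) := by
  rw [bxor_assoc, bxor_assoc, bxor_assoc, PySem.Int.bxor_comm c d,
      ← bxor_assoc b d c, PySem.Int.bxor_comm b d, bxor_assoc d b c]

-- prefix XOR of the first m elements
def pvP (arr : List Int) (m : Nat) : Int :=
  (arr.take m).foldl PySem.Int.bxor 0

theorem pvP_zero (arr : List Int) : pvP arr 0 = 0 := rfl

theorem pvP_succ (arr : List Int) (m : Nat) (h : m < arr.length) :
    pvP arr (m + 1) = PySem.Int.bxor (pvP arr m) arr[m] := by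
  unfold pvP
  rw [List.take_add_one, List.getElem?_eq_getElem h, List.foldl_append]
  rfl

-- A's first loop computes the prefix XOR of the first kn elements.
theorem loopA1 (arr : List Int) (kn : Nat) (hk : kn ≤ arr.length) :
    (PySem.List.pyRange 0 (kn : Int) 1).foldl
      (fun w i => PySem.Int.bxor w (PySem.List.pyGetD arr i 0)) 0 = pvP arr kn := by
  induction kn with
  | zero => simp [PySem.List.pyRange_one_eq_nil, pvP_zero]
  | succ m ih =>
    have hm : m < arr.length := hk
    have hsplit : PySem.List.pyRange 0 ((m + 1 : Nat) : Int) 1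
        = PySem.List.pyRange 0 (m : Nat) 1 ++ [(m : Int)] := by
      push_cast
      exact PySem.List.pyRange_one_succ_right (by exact_mod_cast Nat.zero_le m)
    rw [hsplit, List.foldl_append, ih (Nat.le_of_lt hm)]
    simp only [List.foldl_cons, List.foldl_nil]
    rw [PySem.List.pyGetD_natCast, List.getD_eq_getElem _ _ hm, pvP_succ arr m hm]

-- A's sliding loop: window invariant + running max as a fold over window values.
theorem loopA2 (arr : List Int) (kn : Nat) :
    ∀ (jn : Nat), kn ≤ jn → jn ≤ arr.length → ∀ (M : Int),
    (PySem.List.pyRange (kn : Int) (jn : Int) 1).foldl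
      (fun (st : Int × Int) i =>
        let w := PySem.Int.bxor
          (PySem.Int.bxor st.1 (PySem.List.pyGetD arr (i - (kn : Int)) 0))
          (PySem.List.pyGetD arr i 0)
        (w, max st.2 w))
      (pvP arr kn, M)
    = (PySem.Int.bxor (pvP arr jn) (pvP arr (jn - kn)),
       (PySem.List.pyRange ((kn : Int) + 1) ((jn : Int) + 1) 1).foldl
         (fun m i => max m (PySem.Int.bxor (pvP arr i.toNat) (pvP arr (i.toNat - kn)))) M) := by
  intro jn hkj
  induction jn, hkj using Nat.le_induction with
  | base =>
    intro _ M
    rw [PySem.List.pyRange_one_eq_nil (le_refl _),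
        PySem.List.pyRange_one_eq_nil (le_refl _)]
    simp [pvP_zero]
  | succ j hkj ih =>
    intro hlen M
    have hj : j < arr.length := hlen
    have hsplit : PySem.List.pyRange (kn : Int) ((j + 1 : Nat) : Int) 1
        = PySem.List.pyRange (kn : Int) (j : Int) 1 ++ [(j : Int)] := by
      push_cast
      exact PySem.List.pyRange_one_succ_right (by exact_mod_cast hkj)
    have hsplit' : PySem.List.pyRange ((kn : Int) + 1) (((j + 1 : Nat) : Int) + 1) 1
        = PySem.List.pyRange ((kn : Int) + 1) ((j : Int) + 1) 1 ++ [(j : Int) + 1] := by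
      push_cast
      exact PySem.List.pyRange_one_succ_right (by exact_mod_cast Nat.succ_le_succ hkj)
    rw [hsplit, List.foldl_append, ih (Nat.le_of_lt hj) M, hsplit', List.foldl_append]
    simp only [List.foldl_cons, List.foldl_nil]
    have hsub : ((j : Int) - (kn : Int)) = ((j - kn : Nat) : Int) := by
      push_cast [Nat.cast_sub hkj]; ring
    have hjk : j - kn < arr.length := lt_of_le_of_lt (Nat.sub_le _ _) hj
    have hw : PySem.Int.bxor
        (PySem.Int.bxor (PySem.Int.bxor (pvP arr j) (pvP arr (j - kn)))
          (PySem.List.pyGetD arr ((j : Int) - (kn : Int)) 0))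
        (PySem.List.pyGetD arr (j : Int) 0)
      = PySem.Int.bxor (pvP arr (j + 1)) (pvP arr (j + 1 - kn)) := by
      rw [hsub, PySem.List.pyGetD_natCast, PySem.List.pyGetD_natCast,
          List.getD_eq_getElem _ _ hjk, List.getD_eq_getElem _ _ hj,
          bxor_four, ← pvP_succ arr j hj, ← pvP_succ arr (j - kn) hjk,
          Nat.sub_add_comm hkj]
    have htn : ((j : Int) + 1).toNat = j + 1 := by omega
    rw [Prod.mk.injEq]
    refine ⟨by simpa using hw, ?_⟩
    simp only [htn]
    rw [← hw]

-- B's prefix accumulator builds the table of prefix XORs.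
theorem buildPrefix (arr : List Int) :
    ∀ (m : Nat), m ≤ arr.length →
    (arr.take m).foldl
        (fun p x => p ++ [PySem.Int.bxor (PySem.List.pyGetD p (-1) 0) x]) [0]
      = (List.range (m + 1)).map (fun j => pvP arr j) := by
  intro m
  induction m with
  | zero => simp [pvP_zero]
  | succ m ih =>
    intro hm
    have hmlt : m < arr.length := hm
    rw [List.take_succ, List.getElem?_eq_getElem hmlt]
    simp only [Option.toList_some, List.foldl_append, ih (Nat.le_of_lt hmlt),
      List.foldl_cons, List.foldl_nil]
    have hlast : PySem.List.pyGetD ((List.range (m + 1)).map (fun j => pvP arr j)) (-1) 0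
        = pvP arr m := by
      rw [List.range_succ, List.map_append]
      simpa using PySem.List.pyGetD_neg_one_append_singleton
        ((List.range (m + 1)).map (fun j => pvP arr j)) (pvP arr m) 0
    rw [hlast, ← pvP_succ arr m hmlt, List.range_succ (n := m + 1), List.map_append]
    rfl

-- ===== VERDICT (by name: the statement is the Claim_ definition above) =====
theorem maxSubarrayXOR_spec : Claim_equal_maxSubarrayXOR := by
  intro arr k _ hpre
  obtain ⟨hk0, hkn⟩ := hpre
  unfold Spec_maxSubarrayXOR maxSubarrayXOR maxSubarrayXOR_alt
  obtain ⟨kn, rfl⟩ : ∃ kn : Nat, k = (kn : Int) := ⟨k.toNat, (Int.toNat_of_nonneg hk0).symm⟩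
  have hklen : kn ≤ arr.length := by exact_mod_cast hkn
  -- A side
  rw [loopA1 arr kn hklen]
  have hA := loopA2 arr kn arr.length hklen (le_refl _) (pvP arr kn)
  simp only [hA]
  -- B side
  have hbuild := buildPrefix arr arr.length (le_refl _)
  rw [List.take_length] at hbuild
  rw [hbuild]
  have hlen : (((List.range (arr.length + 1)).map (fun j => pvP arr j)).length : Int)
      = (arr.length : Int) + 1 := by simp
  rw [hlen]
  have hget : ∀ (i : Int), 0 ≤ i → i ≤ (arr.length : Int) →
      PySem.List.pyGetD ((List.range (arr.length + 1)).map (fun j => pvP arr j)) i 0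
        = pvP arr i.toNat := by
    intro i h0 hle
    rw [← Int.toNat_of_nonneg h0, PySem.List.pyGetD_natCast]
    have hlt : i.toNat < arr.length + 1 := by omega
    rw [List.getD_eq_getElem _ _ (by simpa using hlt)]
    simp only [List.getElem_map, List.getElem_range, Int.toNat_natCast]
  -- initial value
  have hm0 : PySem.List.pyGetD ((List.range (arr.length + 1)).map (fun j => pvP arr j))
      ((kn : Int)) 0 = pvP arr kn := by
    rw [hget (kn : Int) (by positivity) hkn]; simp
  rw [hm0]
  -- the two max-folds agree pointwise on the range
  have hfold : (PySem.List.pyRange ((kn : Int) + 1) ((arr.length : Int) + 1) 1).foldl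
      (fun m i => max m (PySem.Int.bxor
        (PySem.List.pyGetD ((List.range (arr.length + 1)).map (fun j => pvP arr j)) i 0)
        (PySem.List.pyGetD ((List.range (arr.length + 1)).map (fun j => pvP arr j)) (i - (kn : Int)) 0))) (pvP arr kn)
    = (PySem.List.pyRange ((kn : Int) + 1) ((arr.length : Int) + 1) 1).foldl
      (fun m i => max m (PySem.Int.bxor (pvP arr i.toNat) (pvP arr (i.toNat - kn)))) (pvP arr kn) := by
    apply PySem.List.foldl_congr_mem
    intro acc x hx
    rw [PySem.List.mem_pyRange_one] at hx
    obtain ⟨hx1, hx2⟩ := hx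
    have h0x : 0 ≤ x := by omega
    have hxk : ((x - (kn : Int)).toNat) = x.toNat - kn := by omega
    rw [hget x h0x (by omega), hget (x - (kn : Int)) (by omega) (by omega), hxk]
  rw [hfold]
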